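-- pv_equiv track=rewrite | github.com/lazarus0320/Algorithm | 프로그래머스/2/42586. 기능개발/기능개발.py | solution
-- ===== SOURCE A (Python) =====
-- import math
--
-- def solution(progresses, speeds):
--     answer = []
--
--     # 1. 각 원소별로 남은 시간을 먼저 리스트화 한다.
--     # 2. 지금 위치한 원소의 남은시간 < 다음 원소 남은시간 -> 1건
--     # 3. 지금 위치한 원소 남은시간(위치 고정) > 다음 원소 남은시간
--     # 3-1. 다음 인덱스 넘어가면서 처음 고정한 위치랑 비교.. 반복하면서 카운트 -> n건 반환
--
--     prev_time = math.ceil((100 - progresses[0]) / speeds[0])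
--     count = 1
--     for i in range(1, len(progresses)):
--         cur_time = math.ceil((100 - progresses[i]) / speeds[i])
--
--         if prev_time < cur_time:
--             answer.append(count)
--             prev_time = cur_time
--             count = 1
--
--         else:
--             count += 1
--     answer.append(count)
--     return answer
-- ===== SOURCE B (Python) =====
-- def solution(progresses, speeds):
--     # days until each feature is deployable: ceil((100 - p) / s), in integers
--     days = [-((progresses[i] - 100) // speeds[i]) for i in range(len(progresses))]
--     # running maximum: runmax[i] = max(days[:i+1])
--     runmax = days[:1]
--     for d in days[1:]:
--         runmax.append(max(runmax[-1], d))
--     # a new batch starts exactly where the running maximum strictly increases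
--     starts = [i for i in range(len(days)) if i == 0 or days[i] > runmax[i - 1]]
--     # batch sizes = gaps between consecutive batch starts
--     return [b - a for a, b in zip(starts, starts[1:] + [len(days)])]
-- ===== Notes on version B (the rewrite author's own statement) =====
-- stated objective: alternative
-- what changed: Replaces A's fused single pass with mutable prev/count state by a two-phase formulation: build the integer days list and its running-maximum list, take the batch-start indices (where the running maximum strictly increases), and return the gaps between consecutive starts.
-- crash fix: On empty progresses A raises IndexError (progresses[0]); B returns []. — e.g. on solution([], []): A raises IndexError, B returns []
import Mathlib
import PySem

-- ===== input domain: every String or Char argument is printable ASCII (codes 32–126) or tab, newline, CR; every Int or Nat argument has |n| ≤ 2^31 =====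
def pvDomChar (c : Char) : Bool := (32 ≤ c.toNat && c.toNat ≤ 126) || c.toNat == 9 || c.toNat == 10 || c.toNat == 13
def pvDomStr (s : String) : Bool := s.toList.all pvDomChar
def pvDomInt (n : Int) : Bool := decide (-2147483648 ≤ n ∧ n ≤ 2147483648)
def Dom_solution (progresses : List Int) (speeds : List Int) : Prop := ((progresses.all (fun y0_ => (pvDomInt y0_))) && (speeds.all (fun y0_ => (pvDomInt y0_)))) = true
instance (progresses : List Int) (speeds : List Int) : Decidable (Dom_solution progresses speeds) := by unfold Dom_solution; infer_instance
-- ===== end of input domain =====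

-- B groups deployments as gaps between the indices where the running maximum of the days list
-- strictly increases (two-phase), instead of A's fused pass with prev/count state; return values
-- agree on Pre_, and equality is about the return value only (no mutation in either program).

-- ===== PORT A =====
-- math.ceil((100 - p) / s) on the admitted integer domain is exact integer ceiling division,
-- written in Python as -((-(100 - p)) // s); exact here because |100 - p| ≤ 2^31 + 100 and
-- |s| ≤ 2^31, so the float quotient never rounds across an integer.
def pyCeil100 (p s : Int) : Int := -(PySem.Int.floordiv (-(100 - p)) s)

def aStep (st : List Int × Int × Int) (cur : Int) : List Int × Int × Int :=
  if st.2.1 < cur then (st.1 ++ [st.2.2], cur, 1) else (st.1, st.2.1, st.2.2 + 1)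

def solution (progresses : List Int) (speeds : List Int) : List Int :=
  let prev0 := pyCeil100 (PySem.List.pyGetD progresses 0 0) (PySem.List.pyGetD speeds 0 0)
  let s := (PySem.List.pyRange 1 (progresses.length : Int) 1).foldl
    (fun st i =>
      aStep st (pyCeil100 (PySem.List.pyGetD progresses i 0) (PySem.List.pyGetD speeds i 0)))
    ([], prev0, 1)
  s.1 ++ [s.2.2]

-- ===== PORT B =====
-- days[i] = -((progresses[i] - 100) // speeds[i])
def bDays (progresses : List Int) (speeds : List Int) : List Int :=
  (List.range progresses.length).map (fun (i : Nat) =>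
    -(PySem.Int.floordiv (PySem.List.pyGetD progresses ((i : Int)) 0 - 100)
                         (PySem.List.pyGetD speeds ((i : Int)) 0)))

-- running maximum list: runmax = days[:1]; for d in days[1:]: runmax.append(max(runmax[-1], d))
def bRunmax (days : List Int) : List Int :=
  (days.drop 1).foldl (fun acc d2 => acc ++ [max (PySem.List.pyGetD acc (-1) 0) d2])
    (days.take 1)

-- 'i == 0 or days[i] > runmax[i - 1]' (the second disjunct is only reached for i >= 1)
def bStartP (days : List Int) (i : Nat) : Bool :=
  i == 0 || decide ((bRunmax days).getD (i - 1) 0 < days.getD i 0)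

def bStarts (days : List Int) : List Nat :=
  (List.range days.length).filter (bStartP days)

def solution_alt (progresses : List Int) (speeds : List Int) : List Int :=
  let days := bDays progresses speeds
  let starts := bStarts days
  ((starts.zip (starts.drop 1 ++ [days.length])).map (fun p => (p.2 : Int) - (p.1 : Int)))

-- ===== PRECONDITION & SPEC =====
-- Pre_: exactly the inputs on which A returns normally — progresses nonempty (else IndexError at
-- progresses[0]), speeds at least as long (else IndexError), and no zero among the used speeds
-- (else ZeroDivisionError).
def Pre_solution (progresses : List Int) (speeds : List Int) : Prop :=
  progresses ≠ [] ∧ progresses.length ≤ speeds.length ∧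
    ∀ x ∈ speeds.take progresses.length, x ≠ 0
instance (progresses : List Int) (speeds : List Int) : Decidable (Pre_solution progresses speeds) := by
  unfold Pre_solution; infer_instance
def pvWitness_solution : List Int × List Int := ([93, 30, 55], [1, 30, 5])

-- On empty progresses A raises IndexError (progresses[0]); B returns [].
def Raises_solution (progresses : List Int) (speeds : List Int) : Prop := progresses = []
instance (progresses : List Int) (speeds : List Int) : Decidable (Raises_solution progresses speeds) := by
  unfold Raises_solution; infer_instance
def pvRaiseWitness_solution : List Int × List Int := ([], [])
def pvRaiseWitnessOut_solution : List Int := []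

def Spec_solution (progresses : List Int) (speeds : List Int) (out : List Int) : Prop := out = solution_alt progresses speeds
instance (progresses : List Int) (speeds : List Int) (out : List Int) : Decidable (Spec_solution progresses speeds out) := by unfold Spec_solution; infer_instance

-- ===== CLAIM (what is proved, stated in full; the proofs are below) =====
def Claim_equal_solution : Prop := ∀ (progresses : List Int) (speeds : List Int), Dom_solution progresses speeds → Pre_solution progresses speeds → Spec_solution progresses speeds (solution progresses speeds)

def Claim_raises_solution : Prop := (∀ (progresses : List Int) (speeds : List Int), Dom_solution progresses speeds → Raises_solution progresses speeds → ¬ Pre_solution progresses speeds) ∧ (Dom_solution (pvRaiseWitness_solution.1) (pvRaiseWitness_solution.2) ∧ Raises_solution (pvRaiseWitness_solution.1) (pvRaiseWitness_solution.2) ∧ solution_alt (pvRaiseWitness_solution.1) (pvRaiseWitness_solution.2) = pvRaiseWitnessOut_solution)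

-- ===== LEMMAS AND PROOFS =====

def pmax (d : Int) (ds : List Int) : Int := ds.foldl max d

theorem zip_snoc (x : Nat) : ∀ (st : List Nat), st ≠ [] →
    st.zip (st.tail ++ [x]) = st.zip st.tail ++ [(st.getLastD 0, x)]
  | [], h => absurd rfl h
  | [a], _ => rfl
  | a :: b :: t, _ => by
    have ih := zip_snoc x (b :: t) (by simp)
    simp only [List.tail_cons] at *
    simp [List.zip_cons_cons, ih]

def bRun (d : Int) (ds : List Int) : List Int :=
  ds.foldl (fun acc d2 => acc ++ [max (PySem.List.pyGetD acc (-1) 0) d2]) [d]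

theorem bRunmax_cons (d : Int) (ds : List Int) : bRunmax (d :: ds) = bRun d ds := rfl

theorem bRun_spec (d : Int) (ds : List Int) :
    (bRun d ds).length = ds.length + 1 ∧
      ∀ k, k ≤ ds.length → (bRun d ds).getD k 0 = pmax d (ds.take k) := by
  induction ds using List.reverseRecOn with
  | nil =>
    refine ⟨rfl, ?_⟩
    intro k hk
    simp only [List.length_nil, Nat.le_zero] at hk
    subst hk
    simp [bRun, pmax]
  | append_singleton ds c ih =>
    obtain ⟨ihl, ihe⟩ := ih
    have hne : bRun d ds ≠ [] := by
      intro h; rw [h] at ihl; simp at ihl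
    have hlast : (bRun d ds).getLast hne = pmax d ds := by
      have he := ihe ds.length (le_refl _)
      rw [List.take_of_length_le (le_refl _)] at he
      rw [List.getLast_eq_getElem, ← List.getD_eq_getElem (bRun d ds) 0 (by omega)]
      rw [show (bRun d ds).length - 1 = ds.length by omega]
      exact he
    have hstep : bRun d (ds ++ [c]) = bRun d ds ++ [max (pmax d ds) c] := by
      have h1 : bRun d (ds ++ [c]) =
          bRun d ds ++ [max (PySem.List.pyGetD (bRun d ds) (-1) 0) c] := by
        unfold bRun
        rw [List.foldl_append]
        simp only [List.foldl_cons, List.foldl_nil]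
      rw [h1, PySem.List.pyGetD_neg_one (bRun d ds) 0 hne, hlast]
    constructor
    · rw [hstep]; simp [ihl]
    · intro k hk
      rw [hstep]
      by_cases hk2 : k ≤ ds.length
      · by_cases hk3 : k < (bRun d ds).length
        · rw [List.getD_append _ _ _ _ hk3, ihe k hk2,
            List.take_append_of_le_length hk2]
        · -- k = ds.length + 1 impossible with hk2 unless k = length; here k = ds.length and ihl
          exact absurd (by omega : k < (bRun d ds).length) hk3
      · have hkeq : k = ds.length + 1 := by simpa using Nat.le_antisymm (by simpa using hk) (by omega)
        rw [hkeq, List.getD_append_right _ _ _ _ (by omega), ihl]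
        simp only [Nat.sub_self, List.getD_cons_zero]
        rw [List.take_of_length_le (by simp)]
        simp [pmax]

-- recomputing bStartP on the extended list agrees on old indices
theorem bStartP_append (d c : Int) (ds : List Int) (i : Nat) (hi : i < ds.length + 1) :
    bStartP (d :: (ds ++ [c])) i = bStartP (d :: ds) i := by
  unfold bStartP
  by_cases h0 : i = 0
  · subst h0; rfl
  · have h1 : i - 1 ≤ ds.length := by omega
    rw [bRunmax_cons, bRunmax_cons,
      (bRun_spec d (ds ++ [c])).2 (i - 1) (by simp; omega),
      (bRun_spec d ds).2 (i - 1) h1,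
      List.take_append_of_le_length h1]
    have hgetD : (d :: (ds ++ [c])).getD i 0 = (d :: ds).getD i 0 := by
      have : (d :: (ds ++ [c])) = (d :: ds) ++ [c] := by simp
      rw [this, List.getD_append _ _ _ _ (by simpa using hi)]
    rw [hgetD]

theorem bStartP_last (d c : Int) (ds : List Int) :
    bStartP (d :: (ds ++ [c])) (ds.length + 1) = decide (pmax d ds < c) := by
  unfold bStartP
  rw [bRunmax_cons, (bRun_spec d (ds ++ [c])).2 ((ds.length + 1) - 1) (by simp),
    Nat.add_sub_cancel, List.take_append_of_le_length (le_refl _),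
    List.take_of_length_le (le_refl _)]
  have hgetD : (d :: (ds ++ [c])).getD (ds.length + 1) 0 = c := by
    have : (d :: (ds ++ [c])) = (d :: ds) ++ [c] := by simp
    rw [this, List.getD_append_right _ _ _ _ (by simp)]
    simp
  rw [hgetD]
  simp

theorem bStarts_snoc (d c : Int) (ds : List Int) :
    bStarts (d :: (ds ++ [c])) =
      bStarts (d :: ds) ++ (if pmax d ds < c then [ds.length + 1] else []) := by
  unfold bStarts
  have hlen : (d :: (ds ++ [c])).length = (ds.length + 1) + 1 := by simp
  rw [hlen, List.range_succ, List.filter_append]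
  congr 1
  · apply List.filter_congr
    intro i hi
    exact bStartP_append d c ds i (by simpa using List.mem_range.mp hi)
  · simp only [List.filter_cons, List.filter_nil]
    rw [bStartP_last d c ds]
    split_ifs with h <;> simp_all

theorem key (d : Int) (ds : List Int) :
    (ds.foldl aStep ([], d, 1)).1 =
        ((bStarts (d :: ds)).zip (bStarts (d :: ds)).tail).map
          (fun p => (p.2 : Int) - (p.1 : Int)) ∧
      (ds.foldl aStep ([], d, 1)).2.1 = pmax d ds ∧
      (ds.foldl aStep ([], d, 1)).2.2 =
        (ds.length : Int) + 1 - ((bStarts (d :: ds)).getLastD 0 : Int) ∧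
      bStarts (d :: ds) ≠ [] ∧ (bStarts (d :: ds)).getLastD 0 ≤ ds.length := by
  induction ds using List.reverseRecOn with
  | nil =>
    have h1 : bStarts [d] = [0] := by
      simp [bStarts, bStartP]
    simp [h1, pmax]
  | append_singleton ds c ih =>
    obtain ⟨ih1, ih2, ih3, ih4, ih5⟩ := ih
    rw [List.foldl_append, bStarts_snoc d c ds]
    simp only [List.foldl_cons, List.foldl_nil]
    have hpm : pmax d (ds ++ [c]) = max (pmax d ds) c := by simp [pmax]
    by_cases h : pmax d ds < c
    · simp only [if_pos h]
      have hstep : aStep (ds.foldl aStep ([], d, 1)) c =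
          ((ds.foldl aStep ([], d, 1)).1 ++ [(ds.foldl aStep ([], d, 1)).2.2], c, 1) := by
        simp [aStep, ih2, h]
      rw [hstep]
      have htail : (bStarts (d :: ds) ++ [ds.length + 1]).tail =
          (bStarts (d :: ds)).tail ++ [ds.length + 1] := by
        cases hst : bStarts (d :: ds) with
        | nil => exact absurd hst ih4
        | cons a t => simp
      have hzip : (bStarts (d :: ds) ++ [ds.length + 1]).zip
            ((bStarts (d :: ds)).tail ++ [ds.length + 1]) =
          (bStarts (d :: ds)).zip ((bStarts (d :: ds)).tail ++ [ds.length + 1]) := by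
        have hl : (bStarts (d :: ds)).length = ((bStarts (d :: ds)).tail ++ [ds.length + 1]).length := by
          cases hst : bStarts (d :: ds) with
          | nil => exact absurd hst ih4
          | cons a t => simp
        have := List.zip_append (l₁ := bStarts (d :: ds)) (r₁ := [ds.length + 1])
          (l₂ := (bStarts (d :: ds)).tail ++ [ds.length + 1]) (r₂ := ([] : List Nat)) hl
        simpa using this
      refine ⟨?_, ?_, ?_, by simp, by simp⟩
      · rw [htail, hzip, zip_snoc (ds.length + 1) _ ih4, List.map_append, ← ih1]
        simp only [List.map_cons, List.map_nil]
        rw [ih3, show ((ds.length + 1 : Nat) : Int) = (ds.length : Int) + 1 by push_cast; ring]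
      · rw [hpm, max_eq_right h.le]
      · rw [List.getLastD_concat]
        simp only [List.length_append, List.length_cons, List.length_nil]
        push_cast
        omega
    · simp only [if_neg h, List.append_nil]
      have hstep : aStep (ds.foldl aStep ([], d, 1)) c =
          ((ds.foldl aStep ([], d, 1)).1, (ds.foldl aStep ([], d, 1)).2.1,
            (ds.foldl aStep ([], d, 1)).2.2 + 1) := by
        simp [aStep, ih2, h]
      rw [hstep]
      refine ⟨ih1, ?_, ?_, ih4, by
        have := ih5
        simp only [List.length_append, List.length_cons, List.length_nil]
        omega⟩
      · rw [hpm, max_eq_left (not_lt.mp h), ih2]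
      · rw [ih3]
        simp only [List.length_append, List.length_cons, List.length_nil]
        push_cast
        ring

theorem main_eq (p s : List Int) (hne : p ≠ []) :
    solution p s = solution_alt p s := by
  have hdl : (bDays p s).length = p.length := by simp [bDays]
  cases hd : bDays p s with
  | nil =>
    exfalso
    rw [hd] at hdl
    exact hne (List.eq_nil_of_length_eq_zero hdl.symm)
  | cons d ds =>
    have hplen : p.length = ds.length + 1 := by rw [← hdl, hd]; simp
    have hday : ∀ k : Nat, k < p.length →
        (bDays p s).getD k 0 =
          -(PySem.Int.floordiv (PySem.List.pyGetD p (k : Int) 0 - 100)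
              (PySem.List.pyGetD s (k : Int) 0)) := by
      intro k hk
      have hres : (bDays p s)[k]? =
          some (-(PySem.Int.floordiv (PySem.List.pyGetD p (k : Int) 0 - 100)
            (PySem.List.pyGetD s (k : Int) 0))) := by
        unfold bDays
        rw [List.getElem?_map, List.getElem?_range]
        · rfl
        · exact hk
      rw [List.getD_eq_getElem?_getD, hres]
      rfl
    have hprev : pyCeil100 (PySem.List.pyGetD p 0 0) (PySem.List.pyGetD s 0 0) = d := by
      have h0 := hday 0 (by omega)
      rw [hd] at h0
      simp only [List.getD_cons_zero, Nat.cast_zero] at h0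
      unfold pyCeil100
      rw [neg_sub, h0]
    have hfold :
        (PySem.List.pyRange 1 (p.length : Int) 1).foldl
          (fun st i => aStep st (pyCeil100 (PySem.List.pyGetD p i 0) (PySem.List.pyGetD s i 0)))
          ([], d, 1)
        = ds.foldl aStep ([], d, 1) := by
      rw [PySem.List.foldl_congr_mem _ _
          (fun st i => aStep st (PySem.List.pyGetD (bDays p s) i 0)) _ ?_]
      · have hcast : (p.length : Int) = ((bDays p s).length : Int) := by rw [hdl]
        rw [hcast, PySem.List.foldl_pyRange_pyGetD' (bDays p s) 0 aStep ([], d, 1) (by norm_num)]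
        rw [hd]
        simp
      · intro st i hi
        obtain ⟨h1i, hin⟩ := PySem.List.mem_pyRange_one.mp hi
        have h0i : (0 : Int) ≤ i := by omega
        congr 1
        rw [show PySem.List.pyGetD (bDays p s) i 0 = (bDays p s).getD i.toNat 0 from
            PySem.List.pyGetD_of_nonneg _ _ h0i,
          hday i.toNat (by omega), Int.toNat_of_nonneg h0i]
        unfold pyCeil100
        rw [neg_sub]
    obtain ⟨k1, k2, k3, k4, k5⟩ := key d ds
    have hA : solution p s =
        ((PySem.List.pyRange 1 (p.length : Int) 1).foldl
          (fun st i => aStep st (pyCeil100 (PySem.List.pyGetD p i 0) (PySem.List.pyGetD s i 0)))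
          ([], pyCeil100 (PySem.List.pyGetD p 0 0) (PySem.List.pyGetD s 0 0), 1)).1 ++
        [((PySem.List.pyRange 1 (p.length : Int) 1).foldl
          (fun st i => aStep st (pyCeil100 (PySem.List.pyGetD p i 0) (PySem.List.pyGetD s i 0)))
          ([], pyCeil100 (PySem.List.pyGetD p 0 0) (PySem.List.pyGetD s 0 0), 1)).2.2] := rfl
    have hB : solution_alt p s =
        ((bStarts (bDays p s)).zip
          ((bStarts (bDays p s)).drop 1 ++ [(bDays p s).length])).map
          (fun q => (q.2 : Int) - (q.1 : Int)) := rfl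
    rw [hA, hprev, hfold, hB, hd, List.length_cons, List.drop_one,
      zip_snoc (ds.length + 1) _ k4, List.map_append, ← k1]
    simp only [List.map_cons, List.map_nil]
    rw [k3, show ((ds.length + 1 : Nat) : Int) = (ds.length : Int) + 1 by push_cast; ring]

-- ===== VERDICT (by name: the statement is the Claim_ definition above) =====
theorem solution_spec : Claim_equal_solution := by
  intro p s _ hpre
  unfold Spec_solution
  exact main_eq p s hpre.1

theorem solution_raises : Claim_raises_solution := by
  unfold Claim_raises_solution
  exact ⟨by intro p s _ h hpre; exact hpre.1 h, by decide⟩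

-- self-check: the raise-witness value asserted in Claim_raises_solution, read back off the theorem
theorem solution_raises_witness_ok :
    solution_alt pvRaiseWitness_solution.1 pvRaiseWitness_solution.2 = pvRaiseWitnessOut_solution := by
  have h := solution_raises
  unfold Claim_raises_solution at h
  exact h.2.2.2
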